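-- pv_equiv track=rewrite | github.com/shkim5164/algorithm2022 | 힙&해시/programmers_신고 결과 받기.py | solution
-- ===== SOURCE A (Python) =====
-- def solution(id_list, report, k):
--     answer = [0 for i in id_list]
--     set_report = set(report)
--     id_cnt = {user_id: [index, []] for index, user_id in enumerate(id_list)}
--
--     for report in set_report:
--         split_report = report.split()
--         user_id = split_report[0]
--         report_id = split_report[1]
--         id_cnt[report_id][1].append(user_id)
--
--     for key, value in id_cnt.items():
--         report_list = value[1]
--         if len(report_list) >= k:
--             for report_id in report_list:
--                 index = id_cnt[report_id][0]
--                 answer[index] += 1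
--     return answer
-- ===== SOURCE B (Python) =====
-- def solution(id_list, report, k):
--     index = {u: i for i, u in enumerate(id_list)}
--     uniq = set(report)
--     counts = {}
--     for r in uniq:
--         tgt = r.split()[1]
--         counts[tgt] = counts.get(tgt, 0) + 1
--     suspended = {t for t, c in counts.items() if c >= k}
--     answer = [0] * len(id_list)
--     for r in uniq:
--         sp = r.split()
--         if sp[1] in suspended:
--             answer[index[sp[0]]] += 1
--     return answer
-- ===== Notes on version B (the rewrite author's own statement) =====
-- stated objective: simpler
-- what changed: B replaces A's per-user dict of [index, reporter-list] with nested output loops by a reporter-count dict plus a suspended set and one flat pass over the deduplicated reports that increments the reporter's slot directly.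
import Mathlib
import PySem

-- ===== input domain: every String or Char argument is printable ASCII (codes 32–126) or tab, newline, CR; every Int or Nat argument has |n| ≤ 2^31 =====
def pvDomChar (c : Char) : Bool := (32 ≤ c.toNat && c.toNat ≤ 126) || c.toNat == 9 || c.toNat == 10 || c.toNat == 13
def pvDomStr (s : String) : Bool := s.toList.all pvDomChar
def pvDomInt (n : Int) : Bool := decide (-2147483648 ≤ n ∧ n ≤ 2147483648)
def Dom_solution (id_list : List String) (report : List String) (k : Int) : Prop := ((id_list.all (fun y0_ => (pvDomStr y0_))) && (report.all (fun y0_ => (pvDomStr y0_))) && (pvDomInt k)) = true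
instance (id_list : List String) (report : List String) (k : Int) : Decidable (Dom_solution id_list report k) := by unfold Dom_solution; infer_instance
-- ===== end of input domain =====

-- B replaces A's per-user dict of [index, reporter-list] and nested output loops by a count dict,
-- a suspended set and ONE flat pass over the deduplicated reports (objective: simpler).

-- ===== PORT A =====
-- id_cnt = {user_id: [index, []] for index, user_id in enumerate(id_list)}
def solA_init (id_list : List String) : PySem.Dict String (Int × List String) :=
  (PySem.List.enumerate id_list 0).foldl
    (fun d p => d.insert p.2 (p.1, ([] : List String))) PySem.Dict.empty

-- the first 'for report in set_report' loop filling the reporter lists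
-- (split_report[0]/[1] and the id_cnt[...] lookup are total via pyGetD/modify; exact under Pre_,
--  which excludes exactly the inputs where Python raises IndexError/KeyError)
def solA_fill (id_list : List String) (report : List String) :
    PySem.Dict String (Int × List String) :=
  (PySem.Set.ofList report).foldl
    (fun d r =>
      let split_report := PySem.Str.split₀ r
      let user_id := PySem.List.pyGetD split_report 0 ""
      let report_id := PySem.List.pyGetD split_report 1 ""
      d.modify report_id (0, []) (fun v => (v.1, v.2 ++ [user_id])))
    (solA_init id_list)

def solution (id_list : List String) (report : List String) (k : Int) : List Int :=
  let answer : List Int := id_list.map (fun _ => 0)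
  let id_cnt := solA_fill id_list report
  id_cnt.items.foldl
    (fun answer kv =>
      let report_list := kv.2.2
      if ((report_list.length : Int)) ≥ k then
        report_list.foldl
          (fun answer report_id =>
            let index := (id_cnt.getD report_id (0, [])).1
            PySem.List.pySetD answer index (PySem.List.pyGetD answer index 0 + 1))
          answer
      else answer)
    answer

-- ===== PORT B =====
-- index = {u: i for i, u in enumerate(id_list)}
def solB_index (id_list : List String) : PySem.Dict String Int :=
  (PySem.List.enumerate id_list 0).foldl (fun d p => d.insert p.2 p.1) PySem.Dict.empty

-- counts[tgt] = counts.get(tgt, 0) + 1 over the deduplicated reports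
def solB_counts (report : List String) : PySem.Dict String Int :=
  (PySem.Set.ofList report).foldl
    (fun d r =>
      let tgt := PySem.List.pyGetD (PySem.Str.split₀ r) 1 ""
      d.insert tgt (d.getD tgt 0 + 1))
    PySem.Dict.empty

-- suspended = {t for t, c in counts.items() if c >= k}
def solB_susp (report : List String) (k : Int) : PySem.Set String :=
  (solB_counts report).items.foldl
    (fun s p => if p.2 ≥ k then PySem.Set.add s p.1 else s) PySem.Set.empty

def solution_alt (id_list : List String) (report : List String) (k : Int) : List Int :=
  let index := solB_index id_list
  let suspended := solB_susp report k
  (PySem.Set.ofList report).foldl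
    (fun answer r =>
      let sp := PySem.Str.split₀ r
      if PySem.Set.contains suspended (PySem.List.pyGetD sp 1 "") then
        let i := index.getD (PySem.List.pyGetD sp 0 "") 0
        PySem.List.pySetD answer i (PySem.List.pyGetD answer i 0 + 1)
      else answer)
    (List.replicate id_list.length 0)

-- ===== PRECONDITION & SPEC =====
-- Pre_ admits exactly the inputs on which Python A returns: every report must split into at least
-- two tokens, its reported user (token 1) must be an id (else KeyError / IndexError), and its
-- reporter (token 0) must be an id unless the reported user drew fewer than k distinct reports
-- (an unknown reporter is only looked up — KeyError — when its target is suspended).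
def Pre_solution (id_list : List String) (report : List String) (k : Int) : Prop :=
  ∀ r ∈ report,
    2 ≤ (PySem.Str.split₀ r).length ∧
    PySem.List.pyGetD (PySem.Str.split₀ r) 1 "" ∈ id_list ∧
    (PySem.List.pyGetD (PySem.Str.split₀ r) 0 "" ∈ id_list ∨
      (((PySem.Set.ofList report).countP
          (fun s => PySem.List.pyGetD (PySem.Str.split₀ s) 1 "" ==
                    PySem.List.pyGetD (PySem.Str.split₀ r) 1 "")) : Int) < k)

instance (id_list : List String) (report : List String) (k : Int) :
    Decidable (Pre_solution id_list report k) := by unfold Pre_solution; infer_instance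

def pvWitness_solution : List String × List String × Int := (["a", "b"], ["a b", "b a"], 1)

def Spec_solution (id_list : List String) (report : List String) (k : Int) (out : List Int) : Prop := out = solution_alt id_list report k
instance (id_list : List String) (report : List String) (k : Int) (out : List Int) : Decidable (Spec_solution id_list report k out) := by unfold Spec_solution; infer_instance

-- ===== CLAIM (what is proved, stated in full; the proofs are below) =====
def Claim_equal_solution : Prop := ∀ (id_list : List String) (report : List String) (k : Int), Dom_solution id_list report k → Pre_solution id_list report k → Spec_solution id_list report k (solution id_list report k)

-- ===== LEMMAS AND PROOFS =====

-- abbreviations for the two split tokens and one increment step, used only in the proofs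
def pvT0 (r : String) : String := PySem.List.pyGetD (PySem.Str.split₀ r) 0 ""
def pvT1 (r : String) : String := PySem.List.pyGetD (PySem.Str.split₀ r) 1 ""
def pvInc (a : List Int) (i : Int) : List Int :=
  PySem.List.pySetD a i (PySem.List.pyGetD a i 0 + 1)

-- two index dicts built over the same enumerate list agree pointwise
theorem pv_rel_init (l : List (Int × String)) (d1 : PySem.Dict String (Int × List String))
    (d2 : PySem.Dict String Int)
    (h : ∀ u, d1.getD u ((0 : Int), ([] : List String)) = (d2.getD u 0, [])) (u : String) :
    (l.foldl (fun d p => d.insert p.2 (p.1, ([] : List String))) d1).getD u (0, []) =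
      ((l.foldl (fun d p => d.insert p.2 p.1) d2).getD u 0, []) := by
  induction l generalizing d1 d2 with
  | nil => exact h u
  | cons p t ih =>
      simp only [List.foldl_cons]
      apply ih
      intro u
      rw [PySem.Dict.getD_insert, PySem.Dict.getD_insert]
      split_ifs <;> simp [h]

theorem pv_init_eq (id_list : List String) (u : String) :
    (solA_init id_list).getD u (0, []) = ((solB_index id_list).getD u 0, []) := by
  unfold solA_init solB_index
  apply pv_rel_init
  intro u
  simp [PySem.Dict.getD_empty]

theorem pv_keys_init (id_list : List String) :
    (solA_init id_list).keys = PySem.Set.ofList id_list := by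
  unfold solA_init
  have h := PySem.Dict.keys_foldl_insert_key (PySem.List.enumerate id_list 0)
      (fun p => p.2) (fun _ p => (p.1, ([] : List String))) PySem.Dict.empty
  rw [h, PySem.Dict.keys_empty, PySem.List.map_snd_enumerate]
  rfl

theorem pv_nodup_init (id_list : List String) : (solA_init id_list).keys.Nodup := by
  unfold solA_init
  exact PySem.Dict.nodup_keys_foldl_insert_key _ _ _ _ PySem.Dict.nodup_keys_empty

theorem pv_update_eq_self (xs : List String) (s : PySem.Set String)
    (h : ∀ x ∈ xs, x ∈ s) : PySem.Set.update s xs = s := by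
  induction xs generalizing s with
  | nil => rfl
  | cons x t ih =>
      have hx : x ∈ s := h x (by simp)
      have hadd : PySem.Set.add s x = s := by
        simp [PySem.Set.add, PySem.Set.contains, hx]
      simp only [PySem.Set.update, List.foldl_cons] at *
      rw [hadd]
      exact ih s (fun y hy => h y (by simp [hy]))

-- the fill loop: first components untouched, second components collect the reporters
theorem pv_fill_getD (l : List String) (d : PySem.Dict String (Int × List String))
    (h : ∀ r ∈ l, d.contains (pvT1 r) = true) (u : String) :
    (l.foldl (fun d r => d.modify (pvT1 r) ((0 : Int), ([] : List String))
        (fun v => (v.1, v.2 ++ [pvT0 r]))) d).getD u (0, []) =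
      ((d.getD u (0, [])).1,
        (d.getD u (0, [])).2 ++ (l.filter (fun r => pvT1 r == u)).map pvT0) := by
  induction l generalizing d with
  | nil => simp
  | cons r t ih =>
      simp only [List.foldl_cons]
      rw [ih]
      · rw [PySem.Dict.getD_modify]
        by_cases he : u = pvT1 r
        · simp [he]
        · have hne : ¬ (pvT1 r == u) := by simpa using fun hh => he hh.symm
          simp [he, hne]
      · intro r' hr'
        rw [PySem.Dict.contains_modify]
        simp [h r' (by simp [hr'])]

-- count of distinct reports against t
def pvCnt (report : List String) (t : String) : Nat :=
  (PySem.Set.ofList report).countP (fun s => pvT1 s == t)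

theorem pv_counts_eq_map_fold (report : List String) :
    solB_counts report =
      ((PySem.Set.ofList report).map pvT1).foldl
        (fun d x => d.insert x (d.getD x 0 + 1)) PySem.Dict.empty := by
  rw [List.foldl_map]
  rfl

theorem pv_counts_getD (report : List String) (t : String) :
    (solB_counts report).getD t 0 = (pvCnt report t : Int) := by
  rw [pv_counts_eq_map_fold, PySem.Dict.getD_foldl_insert_add_one]
  rw [PySem.Dict.getD_empty, List.count_eq_countP, List.countP_map]
  simp [pvCnt]
  rfl

theorem pv_counts_keys (report : List String) :
    (solB_counts report).keys = PySem.Set.ofList ((PySem.Set.ofList report).map pvT1) := by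
  rw [pv_counts_eq_map_fold, PySem.Dict.keys_foldl_insert, PySem.Dict.keys_empty]
  rfl

theorem pv_counts_nodup (report : List String) : (solB_counts report).keys.Nodup := by
  rw [pv_counts_eq_map_fold]
  exact PySem.Dict.nodup_keys_foldl_insert _ _ _ PySem.Dict.nodup_keys_empty

-- membership in the suspended set
theorem pv_mem_susp_fold (k : Int) (l : List (String × Int)) (s : PySem.Set String) (x : String) :
    x ∈ l.foldl (fun s p => if p.2 ≥ k then PySem.Set.add s p.1 else s) s ↔
      x ∈ s ∨ ∃ p ∈ l, p.1 = x ∧ p.2 ≥ k := by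
  induction l generalizing s with
  | nil => simp
  | cons p t ih =>
      simp only [List.foldl_cons]
      by_cases hp : p.2 ≥ k
      · rw [if_pos hp, ih]
        simp only [PySem.Set.mem_add, List.mem_cons]
        constructor
        · rintro (⟨h | h⟩ | ⟨q, hq, h1, h2⟩)
          · exact Or.inl h
          · exact Or.inr ⟨p, Or.inl rfl, h.symm, hp⟩
          · exact Or.inr ⟨q, Or.inr hq, h1, h2⟩
        · rintro (h | ⟨q, hq | hq, h1, h2⟩)
          · exact Or.inl (Or.inl h)
          · exact Or.inl (Or.inr (by rw [hq] at h1; exact h1.symm))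
          · exact Or.inr ⟨q, hq, h1, h2⟩
      · rw [if_neg hp, ih]
        constructor
        · rintro (h | ⟨q, hq, h1, h2⟩)
          · exact Or.inl h
          · exact Or.inr ⟨q, by simp [hq], h1, h2⟩
        · rintro (h | ⟨q, hq, h1, h2⟩)
          · exact Or.inl h
          · rcases List.mem_cons.1 hq with h' | h'
            · exact absurd (h' ▸ h2) hp
            · exact Or.inr ⟨q, h', h1, h2⟩

theorem pv_susp_contains (report : List String) (k : Int) (r : String)
    (hr : r ∈ PySem.Set.ofList report) :
    PySem.Set.contains (solB_susp report k) (pvT1 r) = decide (k ≤ (pvCnt report (pvT1 r) : Int)) := by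
  have hmem : pvT1 r ∈ (solB_counts report).keys := by
    rw [pv_counts_keys, PySem.Set.mem_ofList]
    exact List.mem_map.2 ⟨r, hr, rfl⟩
  have hitems : (pvT1 r, (pvCnt report (pvT1 r) : Int)) ∈ (solB_counts report).items := by
    rw [← PySem.Dict.get?_eq_some_iff_mem_items _ _ _ (pv_counts_nodup report)]
    have h1 := pv_counts_getD report (pvT1 r)
    rw [PySem.Dict.getD_eq_get?_getD] at h1
    rcases ho : (solB_counts report).get? (pvT1 r) with _ | v
    · exact absurd hmem ((PySem.Dict.get?_eq_none_iff_not_mem_keys _ _).1 ho)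
    · rw [ho] at h1; simp at h1; rw [h1]
  by_cases hk : k ≤ (pvCnt report (pvT1 r) : Int)
  · have hin : pvT1 r ∈ solB_susp report k := by
      rw [solB_susp, pv_mem_susp_fold]
      exact Or.inr ⟨_, hitems, rfl, hk⟩
    simp [PySem.Set.contains, hin, hk]
  · have hout : pvT1 r ∉ solB_susp report k := by
      rw [solB_susp, pv_mem_susp_fold]
      rintro (h | ⟨⟨p1, p2⟩, hp, h1, h2⟩)
      · simp [PySem.Set.empty] at h
      · simp only at h1 h2
        subst h1
        have := PySem.Dict.getD_of_mem_items (solB_counts report) hp (pv_counts_nodup report) 0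
        rw [pv_counts_getD] at this
        exact hk (this ▸ h2)
    simp [PySem.Set.contains, hout, hk]

-- increments at nonnegative indices commute
theorem pv_inc_comm (a : List Int) (i j : Int) (hi : 0 ≤ i) (hj : 0 ≤ j) :
    pvInc (pvInc a i) j = pvInc (pvInc a j) i := by
  unfold pvInc
  rw [PySem.List.pySetD_of_nonneg _ _ hi, PySem.List.pySetD_of_nonneg _ _ hj,
      PySem.List.pySetD_of_nonneg _ _ hi, PySem.List.pySetD_of_nonneg _ _ hj,
      PySem.List.pyGetD_of_nonneg _ _ hi, PySem.List.pyGetD_of_nonneg _ _ hj,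
      PySem.List.pyGetD_of_nonneg _ _ hi, PySem.List.pyGetD_of_nonneg _ _ hj]
  by_cases he : i = j
  · subst he; rfl
  · have hne : i.toNat ≠ j.toNat := by omega
    rw [List.getD_eq_getElem?_getD, List.getD_eq_getElem?_getD,
        List.getD_eq_getElem?_getD, List.getD_eq_getElem?_getD,
        List.getElem?_set_ne hne, List.getElem?_set_ne (Ne.symm hne),
        List.set_comm _ _ hne]

-- values of the index dict are nonnegative
theorem pv_index_nonneg (id_list : List String) (u : String) :
    0 ≤ (solB_index id_list).getD u 0 := by
  unfold solB_index
  have key : ∀ (l : List (Int × String)) (d : PySem.Dict String Int),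
      (∀ p ∈ l, 0 ≤ p.1) → (∀ v, 0 ≤ d.getD v 0) →
      0 ≤ (l.foldl (fun d p => d.insert p.2 p.1) d).getD u 0 := by
    intro l
    induction l with
    | nil => intro d _ hd; exact hd u
    | cons p t ih =>
        intro d hl hd
        simp only [List.foldl_cons]
        apply ih _ (fun q hq => hl q (by simp [hq]))
        intro v
        rw [PySem.Dict.getD_insert]
        split_ifs
        · exact hl p (by simp)
        · exact hd v
  apply key
  · intro p hp
    rcases (PySem.List.mem_enumerate_iff _ _ _).1 hp with ⟨m, hm, rfl⟩
    simp
  · intro v; simp [PySem.Dict.getD_empty]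

-- fused filter into flatMap
theorem pv_flatMap_filter {α β : Type} (p : α → Bool) (g : α → List β) (l : List α) :
    (l.filter p).flatMap g = l.flatMap (fun x => if p x then g x else []) := by
  induction l with
  | nil => rfl
  | cons x t ih =>
      by_cases hx : p x <;> simp [hx, ih]

-- grouping a list by distinct covering keys is a permutation of the list
theorem pv_partition_perm (f : String → String) (K T : List String) (hK : K.Nodup)
    (hT : ∀ r ∈ T, f r ∈ K) :
    (K.flatMap (fun u => T.filter (fun r => f r == u))).Perm T := by
  induction K generalizing T with
  | nil =>
      have hnil : T = [] := by
        cases T with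
        | nil => rfl
        | cons a t => exact absurd (hT a (by simp)) (by simp)
      simp [hnil]
  | cons u K' ih =>
      simp only [List.flatMap_cons]
      have hu : u ∉ K' := by simp at hK; exact hK.1
      have hrw : K'.flatMap (fun u' => T.filter (fun r => f r == u')) =
          K'.flatMap (fun u' => (T.filter (fun r => !(f r == u))).filter (fun r => f r == u')) := by
        apply List.flatMap_congr
        intro u' hu'
        rw [List.filter_filter]
        apply List.filter_congr
        intro x hx
        by_cases hfx : f x = u'
        · have hne : u' ≠ u := fun he => hu (he ▸ hu')
          simp [hfx, hne]
        · simp [hfx]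
      rw [hrw]
      have hperm := ih (T.filter (fun r => !(f r == u))) (hK.of_cons) (by
        intro r hr
        have hrT : r ∈ T := (List.mem_filter.1 hr).1
        have hne : ¬ (f r == u) := by simpa using (List.mem_filter.1 hr).2
        rcases List.mem_cons.1 (hT r hrT) with h | h
        · exact absurd (by simp [h]) hne
        · exact h)
      exact (List.Perm.append_left _ hperm).trans (List.filter_append_perm _ T)

-- named pieces of the common normal form
def pvIdx (id_list : List String) (s : String) : Int := (solB_index id_list).getD s 0
def pvGrp (report : List String) (u : String) : List String :=
  ((PySem.Set.ofList report).filter (fun r => pvT1 r == u)).map pvT0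
def pvT (report : List String) (k : Int) : List String :=
  (PySem.Set.ofList report).filter (fun r => decide (k ≤ (pvCnt report (pvT1 r) : Int)))

theorem pv_fill_eq (id_list : List String) (report : List String) :
    solA_fill id_list report =
      (PySem.Set.ofList report).foldl
        (fun d r => d.modify (pvT1 r) ((0 : Int), ([] : List String))
          (fun v => (v.1, v.2 ++ [pvT0 r]))) (solA_init id_list) := rfl

theorem pv_main (id_list : List String) (report : List String) (k : Int)
    (hpre : Pre_solution id_list report k) :
    solution id_list report k = solution_alt id_list report k := by
  have hpre' : ∀ r ∈ PySem.Set.ofList report,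
      pvT1 r ∈ id_list ∧ (pvT0 r ∈ id_list ∨ ((pvCnt report (pvT1 r) : Int) < k)) := by
    intro r hr
    have hr' : r ∈ report := (PySem.Set.mem_ofList report r).1 hr
    obtain ⟨-, h1, h2⟩ := hpre r hr'
    exact ⟨h1, h2⟩
  have hcont : ∀ r ∈ PySem.Set.ofList report, (solA_init id_list).contains (pvT1 r) = true := by
    intro r hr
    rw [PySem.Dict.contains_iff_mem_keys, pv_keys_init, PySem.Set.mem_ofList]
    exact (hpre' r hr).1
  have hdA : ∀ u, (solA_fill id_list report).getD u (0, []) =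
      (pvIdx id_list u, pvGrp report u) := by
    intro u
    rw [pv_fill_eq, pv_fill_getD _ _ hcont u, pv_init_eq]
    simp [pvIdx, pvGrp]
  have hkeysA : (solA_fill id_list report).keys = PySem.Set.ofList id_list := by
    rw [pv_fill_eq]
    rw [PySem.Dict.keys_foldl_modify_key (PySem.Set.ofList report) (fun r => pvT1 r)
        ((0 : Int), ([] : List String)) (fun _ r v => (v.1, v.2 ++ [pvT0 r])) (solA_init id_list)]
    rw [pv_keys_init]
    apply pv_update_eq_self
    intro x hx
    rcases List.mem_map.1 hx with ⟨r, hr, rfl⟩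
    rw [PySem.Set.mem_ofList]
    exact (hpre' r hr).1
  have hnodupA : (solA_fill id_list report).keys.Nodup := by
    rw [pv_fill_eq]
    exact PySem.Dict.nodup_keys_foldl_modify_key _ _ _ _ _ (pv_nodup_init id_list)
  -- A in the normal form: fold pvInc over an index list
  have hA : solution id_list report k =
      ((((PySem.Set.ofList id_list).filter
            (fun u => decide (((pvGrp report u).length : Int) ≥ k))).flatMap
          (fun u => pvGrp report u)).map (pvIdx id_list)).foldl pvInc
        (id_list.map (fun _ => (0 : Int))) := by
    show ((solA_fill id_list report).items.foldl
        (fun answer kv =>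
          if ((kv.2.2.length : Int)) ≥ k then
            kv.2.2.foldl
              (fun answer rid =>
                pvInc answer (((solA_fill id_list report).getD rid (0, [])).1)) answer
          else answer)
        (id_list.map (fun _ => 0))) = _
    rw [PySem.List.foldl_ite_eq_foldl_filter
        (fun kv : String × (Int × List String) => ((kv.2.2.length : Int)) ≥ k)
        (fun answer kv => kv.2.2.foldl
          (fun answer rid =>
            pvInc answer (((solA_fill id_list report).getD rid (0, [])).1)) answer)]
    rw [← List.foldl_flatMap]
    rw [← List.foldl_map (f := fun rid => ((solA_fill id_list report).getD rid (0, [])).1)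
        (g := pvInc)]
    rw [PySem.Dict.items_eq_map_keys _ hnodupA ((0 : Int), ([] : List String))]
    rw [hkeysA]
    simp only [hdA]
    rw [List.filter_map, List.flatMap_map]
    simp [Function.comp_def]
  -- B in the normal form: fold pvInc over an index list
  have hB : solution_alt id_list report k =
      ((pvT report k).map (fun r => pvIdx id_list (pvT0 r))).foldl pvInc
        (List.replicate id_list.length 0) := by
    show ((PySem.Set.ofList report).foldl
        (fun answer r =>
          if PySem.Set.contains (solB_susp report k) (pvT1 r) = true then
            pvInc answer (pvIdx id_list (pvT0 r))
          else answer)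
        (List.replicate id_list.length 0)) = _
    rw [PySem.List.foldl_if_eq_foldl_filter
        (fun r => PySem.Set.contains (solB_susp report k) (pvT1 r))
        (fun answer r => pvInc answer (pvIdx id_list (pvT0 r)))]
    rw [List.filter_congr (fun r hr => pv_susp_contains report k r hr)]
    rw [← List.foldl_map (f := fun r => pvIdx id_list (pvT0 r)) (g := pvInc)]
    rfl
  rw [hA, hB]
  -- the two index lists are permutations of each other
  -- groupwise: the filtered groups are exactly the groups of the suspended-filtered list
  have hgrp : ∀ u, (if decide (((pvGrp report u).length : Int) ≥ k) then pvGrp report u else []) =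
      ((pvT report k).filter (fun r => pvT1 r == u)).map pvT0 := by
    intro u
    have hcntP : ∀ u, (pvGrp report u).length = pvCnt report u := by
      intro u
      rw [pvGrp, List.length_map, pvCnt, List.countP_eq_length_filter]
    have hTfilter : (pvT report k).filter (fun r => pvT1 r == u) =
        (PySem.Set.ofList report).filter
          (fun r => (pvT1 r == u) && decide (k ≤ (pvCnt report (pvT1 r) : Int))) := by
      rw [pvT, List.filter_filter]
    by_cases hku : k ≤ (pvCnt report u : Int)
    · rw [if_pos (by simpa [ge_iff_le, hcntP u] using hku)]
      rw [hTfilter]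
      rw [pvGrp]
      congr 1
      apply List.filter_congr
      intro r hr
      by_cases he : pvT1 r = u
      · simp [he, hku]
      · simp [he]
    · rw [if_neg (by simpa [ge_iff_le, hcntP u] using hku)]
      rw [hTfilter]
      have : (PySem.Set.ofList report).filter
          (fun r => (pvT1 r == u) && decide (k ≤ (pvCnt report (pvT1 r) : Int))) = [] := by
        rw [List.filter_eq_nil_iff]
        intro r hr
        by_cases he : pvT1 r = u
        · simp [he, hku]
        · simp [he]
      rw [this]
      rfl
  rw [show id_list.map (fun _ => (0 : Int)) = List.replicate id_list.length 0 from by simp]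
  rw [pv_flatMap_filter (fun u => decide (((pvGrp report u).length : Int) ≥ k))
      (fun u => pvGrp report u) (PySem.Set.ofList id_list)]
  rw [List.flatMap_congr (fun u _ => hgrp u)]
  rw [List.map_flatMap]
  simp only [List.map_map]
  rw [← List.map_flatMap]
  have hperm : (List.flatMap (fun u => (pvT report k).filter (fun r => pvT1 r == u))
      (PySem.Set.ofList id_list)).Perm (pvT report k) := by
    apply pv_partition_perm pvT1 _ _ (PySem.Set.nodup_ofList id_list)
    intro r hr
    have hrS : r ∈ PySem.Set.ofList report := (List.mem_filter.1 hr).1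
    rw [PySem.Set.mem_ofList]
    exact (hpre' r hrS).1
  apply List.Perm.foldl_eq' (hperm.map _)
  intro x hx y hy z
  rcases List.mem_map.1 hx with ⟨rx, _, rfl⟩
  rcases List.mem_map.1 hy with ⟨ry, _, rfl⟩
  exact pv_inc_comm z _ _ (pv_index_nonneg id_list _) (pv_index_nonneg id_list _)


-- ===== VERDICT (by name: the statement is the Claim_ definition above) =====
theorem solution_spec : Claim_equal_solution := by
  intro id_list report k _ hpre
  unfold Spec_solution
  exact pv_main id_list report k hpre
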